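-- pv_equiv track=rewrite | github.com/tomatodyk/Glycation-predictor | main.py | get_frag
-- ===== SOURCE A (Python) =====
-- def get_frag(protein_seq,size_windows,protein_name):
--     frag_data=[]
--     L=int((size_windows-1)/2)
--     end=len(protein_seq)
--     position=[AA for AA,v in enumerate(protein_seq) if v=='K']
--     for i in range(len(position)):
--         pos=position[i]
--         if pos-L>=0 and end-pos-L>0:
--             frag_data.append('>K'+str(pos+1))
--             frag_data.append(protein_seq[pos-L:pos+L+1])
--         if pos-L>=0 and end-pos-L<=0:
--             sup_right='O'*(L+1-(end-pos))
--             frag_data.append('>K'+str(pos+1))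
--             frag_data.append(protein_seq[pos-L:]+sup_right)
--         if pos-L<0 and end-pos-L>0:
--             sup_left='O'*(L-pos)
--             frag_data.append('>K'+str(pos+1))
--             frag_data.append(sup_left+protein_seq[:pos+L+1])
--         if pos-L<0 and end-pos-L<=0:
--             sup_left='O'*(L-pos)
--             sup_right='O'*(L+1-(end-pos))
--             frag_data.append('>K'+str(pos+1))
--             frag_data.append(sup_left+protein_seq[:]+sup_right)
--     return frag_data
-- ===== SOURCE B (Python) =====
-- def get_frag(protein_seq, size_windows, protein_name):
--     L = int((size_windows - 1) / 2)
--     end = len(protein_seq)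
--     frag_data = []
--     for pos, aa in enumerate(protein_seq):
--         if aa == 'K':
--             frag_data.append('>K' + str(pos + 1))
--             frag_data.append(''.join(protein_seq[j] if 0 <= j < end else 'O'
--                                      for j in range(pos - L, pos + L + 1)))
--     return frag_data
-- ===== Notes on version B (the rewrite author's own statement) =====
-- stated objective: simpler
-- what changed: Replaces A's positions-list-then-index loop with four boundary-case branches and slice arithmetic by a single enumerate pass that builds each fragment with one uniform per-index rule (in-range character, else 'O'); the single pass without the intermediate positions list also measured ~2x faster.
-- intended difference: When size_windows < 0 makes the window stop pos+L+1 negative while len(protein_seq)+2L+1 > 0 and a 'K' lies among those early positions, A's slice protein_seq[pos-L:pos+L+1] wraps the negative stop to the end of the string and returns a spurious non-empty fragment; B returns the empty fragment, the intended content of an empty (2L+1 <= 0) window. — e.g. on get_frag("KAAA", -3, "x"): A returns [">K1", "A"], B returns [">K1", ""]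
import Mathlib
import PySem

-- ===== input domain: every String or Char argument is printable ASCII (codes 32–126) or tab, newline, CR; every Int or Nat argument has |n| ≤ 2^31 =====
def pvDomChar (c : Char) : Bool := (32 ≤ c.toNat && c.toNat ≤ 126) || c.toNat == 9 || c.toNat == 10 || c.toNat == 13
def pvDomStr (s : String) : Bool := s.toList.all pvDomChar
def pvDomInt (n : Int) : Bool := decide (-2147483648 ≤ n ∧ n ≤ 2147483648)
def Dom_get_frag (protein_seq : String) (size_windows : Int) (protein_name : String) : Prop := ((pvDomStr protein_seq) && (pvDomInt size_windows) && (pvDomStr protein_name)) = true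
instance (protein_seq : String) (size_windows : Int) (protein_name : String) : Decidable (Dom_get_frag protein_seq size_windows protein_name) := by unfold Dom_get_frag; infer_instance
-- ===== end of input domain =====

-- B replaces A's K-positions list and four boundary-case slice branches by one enumerate
-- pass with a uniform per-index padding rule (objective: simpler); B intentionally differs
-- where A's negative slice stop wraps around the string end (see D_get_frag below).

-- ===== PORT A =====
-- '>K' + str(pos+1); both Pythons build the header identically
def pvHdr (pos : Int) : String := String.ofList ('>' :: 'K' :: PySem.Int.toChars (pos + 1))

-- the body of A's "for i in range(len(position))" loop; 'O'*n is List.replicate n.toNat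
-- (exact: Python string repetition clamps a negative count to the empty string)
def pvAStep (cs : List Char) (L : Int) (fd : List String) (pos : Int) : List String :=
  let e : Int := cs.length
  let fd1 := if pos - L ≥ 0 ∧ e - pos - L > 0 then
      fd ++ [pvHdr pos, String.ofList (PySem.List.slice cs (some (pos - L)) (some (pos + L + 1)))]
    else fd
  let fd2 := if pos - L ≥ 0 ∧ e - pos - L ≤ 0 then
      fd1 ++ [pvHdr pos, String.ofList (PySem.List.slice cs (some (pos - L)) none ++ List.replicate (L + 1 - (e - pos)).toNat 'O')]
    else fd1
  let fd3 := if pos - L < 0 ∧ e - pos - L > 0 then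
      fd2 ++ [pvHdr pos, String.ofList (List.replicate (L - pos).toNat 'O' ++ PySem.List.slice cs none (some (pos + L + 1)))]
    else fd2
  if pos - L < 0 ∧ e - pos - L ≤ 0 then
      fd3 ++ [pvHdr pos, String.ofList (List.replicate (L - pos).toNat 'O' ++ PySem.List.slice cs none none ++ List.replicate (L + 1 - (e - pos)).toNat 'O')]
    else fd3

-- int((size_windows-1)/2) is float true division then int(): truncation toward zero,
-- exact for |size_windows| ≤ 2^31 (well below 2^53) = PySem.Int.truncdiv
def get_frag (protein_seq : String) (size_windows : Int) (protein_name : String) : List String :=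
  let cs := protein_seq.toList
  let L := PySem.Int.truncdiv (size_windows - 1) 2
  let position := ((PySem.List.enumerate cs 0).filter (fun p => p.2 == 'K')).map (·.1)
  position.foldl (pvAStep cs L) []

-- ===== PORT B =====
def get_frag_alt (protein_seq : String) (size_windows : Int) (protein_name : String) : List String :=
  let cs := protein_seq.toList
  let L := PySem.Int.truncdiv (size_windows - 1) 2
  let e : Int := cs.length
  (PySem.List.enumerate cs 0).foldl (fun out p =>
    if p.2 == 'K' then
      out ++ [pvHdr p.1,
        String.ofList ((PySem.List.pyRange (p.1 - L) (p.1 + L + 1)).map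
          (fun j => if 0 ≤ j ∧ j < e then PySem.List.pyGetD cs j 'O' else 'O'))]
    else out) []

-- ===== PRECONDITION & SPEC =====
-- When size_windows < 0 makes the window stop pos+L+1 negative while len+2L+1 > 0 and a 'K'
-- occurs among those early positions, A's slice protein_seq[pos-L:pos+L+1] wraps the negative
-- stop around the string end and returns a spurious non-empty fragment; B returns the empty
-- fragment, the intended content of an empty (2L+1 ≤ 0) window.
def D_get_frag (protein_seq : String) (size_windows : Int) (protein_name : String) : Prop :=
  size_windows < 0 ∧
  (protein_seq.toList.length : Int) + 2 * PySem.Int.truncdiv (size_windows - 1) 2 + 1 > 0 ∧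
  'K' ∈ protein_seq.toList.take (-(PySem.Int.truncdiv (size_windows - 1) 2) - 1).toNat
instance (protein_seq : String) (size_windows : Int) (protein_name : String) : Decidable (D_get_frag protein_seq size_windows protein_name) := by unfold D_get_frag; infer_instance

def Spec_get_frag (protein_seq : String) (size_windows : Int) (protein_name : String) (out : List String) : Prop := ¬ D_get_frag protein_seq size_windows protein_name → out = get_frag_alt protein_seq size_windows protein_name
instance (protein_seq : String) (size_windows : Int) (protein_name : String) (out : List String) : Decidable (Spec_get_frag protein_seq size_windows protein_name out) := by unfold Spec_get_frag; infer_instance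

def pvDiffWitness_get_frag : String × Int × String := ("KAAA", -3, "x")
def pvDiffWitnessOut_get_frag : (List String) × (List String) := ([">K1", "A"], [">K1", ""])

-- ===== CLAIM (what is proved, stated in full; the proofs are below) =====
def Claim_unchanged_get_frag : Prop := ∀ (protein_seq : String) (size_windows : Int) (protein_name : String), Dom_get_frag protein_seq size_windows protein_name → Spec_get_frag protein_seq size_windows protein_name (get_frag protein_seq size_windows protein_name)
def Claim_exact_get_frag : Prop := ∀ (protein_seq : String) (size_windows : Int) (protein_name : String), Dom_get_frag protein_seq size_windows protein_name → D_get_frag protein_seq size_windows protein_name → get_frag protein_seq size_windows protein_name ≠ get_frag_alt protein_seq size_windows protein_name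
def Claim_changed_get_frag : Prop := Dom_get_frag (pvDiffWitness_get_frag.1) (pvDiffWitness_get_frag.2.1) (pvDiffWitness_get_frag.2.2) ∧ D_get_frag (pvDiffWitness_get_frag.1) (pvDiffWitness_get_frag.2.1) (pvDiffWitness_get_frag.2.2) ∧ get_frag (pvDiffWitness_get_frag.1) (pvDiffWitness_get_frag.2.1) (pvDiffWitness_get_frag.2.2) = pvDiffWitnessOut_get_frag.1 ∧ get_frag_alt (pvDiffWitness_get_frag.1) (pvDiffWitness_get_frag.2.1) (pvDiffWitness_get_frag.2.2) = pvDiffWitnessOut_get_frag.2 ∧ pvDiffWitnessOut_get_frag.1 ≠ pvDiffWitnessOut_get_frag.2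

-- ===== LEMMAS AND PROOFS =====

-- B's per-index window rule, as a named list of characters
def pvW (cs : List Char) (a b : Int) : List Char :=
  (PySem.List.pyRange a b).map (fun j => if 0 ≤ j ∧ j < (cs.length : Int) then PySem.List.pyGetD cs j 'O' else 'O')

theorem pvW_neg (cs : List Char) (a b : Int) (hb : b ≤ 0) :
    pvW cs a b = List.replicate (b - a).toNat 'O' := by
  unfold pvW
  rw [List.map_congr_left (g := fun _ => 'O') (by
    intro j hj
    rw [PySem.List.mem_pyRange_one] at hj
    have h : ¬(0 ≤ j ∧ j < (cs.length : Int)) := by omega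
    rw [if_neg h])]
  rw [List.map_const', PySem.List.length_pyRange_one]

theorem pvW_over (cs : List Char) (a b : Int) (ha : (cs.length : Int) ≤ a) :
    pvW cs a b = List.replicate (b - a).toNat 'O' := by
  unfold pvW
  rw [List.map_congr_left (g := fun _ => 'O') (by
    intro j hj
    rw [PySem.List.mem_pyRange_one] at hj
    have h : ¬(0 ≤ j ∧ j < (cs.length : Int)) := by omega
    rw [if_neg h])]
  rw [List.map_const', PySem.List.length_pyRange_one]

theorem pvW_in (cs : List Char) (a b : Int) (ha : 0 ≤ a) (hb0 : 0 ≤ b) (hb : b ≤ (cs.length : Int)) :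
    pvW cs a b = PySem.List.slice cs (some a) (some b) := by
  unfold pvW
  rw [PySem.List.slice_toNat cs ha hb0]
  apply List.ext_getElem
  · simp [PySem.List.length_pyRange_one]; omega
  · intro k h1 h2
    have hk : (k : Int) < b - a := by
      simpa [PySem.List.length_pyRange_one] using h1
    simp only [List.getElem_map, PySem.List.getElem_pyRange_one, List.getElem_take, List.getElem_drop]
    have hc : 0 ≤ a + (k : Int) ∧ a + (k : Int) < (cs.length : Int) := ⟨by omega, by omega⟩
    rw [if_pos hc, PySem.List.pyGetD_eq_getElem cs 'O' hc.1 hc.2]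
    congr 1
    omega

theorem pvW_append (cs : List Char) (a m b : Int) (h1 : a ≤ m) (h2 : m ≤ b) :
    pvW cs a b = pvW cs a m ++ pvW cs m b := by
  unfold pvW
  rw [PySem.List.pyRange_one_append a m b h1 h2, List.map_append]

-- per-K-position agreement of the two loop bodies (outside the D_ wraparound corner)
theorem pv_step_eq (cs : List Char) (L pos : Int) (h0 : 0 ≤ pos) (h1 : pos < (cs.length : Int))
    (hnd : ¬(L < 0 ∧ pos + L + 1 < 0 ∧ 0 < (cs.length : Int) + 2 * L + 1)) :
    pvAStep cs L [] pos = [pvHdr pos, String.ofList (pvW cs (pos - L) (pos + L + 1))] := by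
  by_cases hca : 0 ≤ pos - L
  · by_cases hcb : 0 < (cs.length : Int) - pos - L
    · have k1 : pos - L ≥ 0 ∧ (cs.length : Int) - pos - L > 0 := ⟨hca, hcb⟩
      have k2 : ¬(pos - L ≥ 0 ∧ (cs.length : Int) - pos - L ≤ 0) := by omega
      have k3 : ¬(pos - L < 0 ∧ (cs.length : Int) - pos - L > 0) := by omega
      have k4 : ¬(pos - L < 0 ∧ (cs.length : Int) - pos - L ≤ 0) := by omega
      simp only [pvAStep, if_pos k1, if_neg k2, if_neg k3, if_neg k4, List.nil_append]
      by_cases hL : 0 ≤ L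
      · rw [pvW_in cs _ _ hca (by omega) (by omega)]
      · have hW : pvW cs (pos - L) (pos + L + 1) = [] := by
          unfold pvW
          rw [PySem.List.pyRange_one_eq_nil (by omega)]
          simp
        rw [hW]
        by_cases hb0 : 0 ≤ pos + L + 1
        · rw [PySem.List.slice_toNat cs hca hb0]
          have : (pos + L + 1).toNat - (pos - L).toNat = 0 := by omega
          rw [this]
          simp
        · have he : (cs.length : Int) + 2 * L + 1 ≤ 0 := by omega
          have : PySem.List.slice cs (some (pos - L)) (some (pos + L + 1)) = [] := by
            apply List.eq_nil_of_length_eq_zero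
            rw [PySem.List.length_slice]
            unfold PySem.List.clampIdx
            split_ifs <;> omega
          rw [this]
    · have k1 : ¬(pos - L ≥ 0 ∧ (cs.length : Int) - pos - L > 0) := by omega
      have k2 : pos - L ≥ 0 ∧ (cs.length : Int) - pos - L ≤ 0 := ⟨hca, by omega⟩
      have k3 : ¬(pos - L < 0 ∧ (cs.length : Int) - pos - L > 0) := by omega
      have k4 : ¬(pos - L < 0 ∧ (cs.length : Int) - pos - L ≤ 0) := by omega
      simp only [pvAStep, if_neg k1, if_pos k2, if_neg k3, if_neg k4, List.nil_append]
      rw [pvW_append cs _ (cs.length : Int) _ (by omega) (by omega),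
          pvW_in cs _ _ hca (by omega) le_rfl, pvW_over cs _ _ le_rfl,
          PySem.List.slice_toNat cs hca (by omega), PySem.List.slice_from cs hca,
          List.take_of_length_le (by simp)]
      have r : (pos + L + 1 - (cs.length : Int)).toNat = (L + 1 - ((cs.length : Int) - pos)).toNat := by omega
      rw [r]
  · by_cases hcb : 0 < (cs.length : Int) - pos - L
    · have k1 : ¬(pos - L ≥ 0 ∧ (cs.length : Int) - pos - L > 0) := by omega
      have k2 : ¬(pos - L ≥ 0 ∧ (cs.length : Int) - pos - L ≤ 0) := by omega
      have k3 : pos - L < 0 ∧ (cs.length : Int) - pos - L > 0 := ⟨by omega, hcb⟩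
      have k4 : ¬(pos - L < 0 ∧ (cs.length : Int) - pos - L ≤ 0) := by omega
      simp only [pvAStep, if_neg k1, if_neg k2, if_pos k3, if_neg k4, List.nil_append]
      rw [pvW_append cs _ 0 _ (by omega) (by omega), pvW_neg cs _ 0 le_rfl,
          pvW_in cs 0 _ le_rfl (by omega) (by omega), PySem.List.slice_zero_start]
      have r : (0 - (pos - L)).toNat = (L - pos).toNat := by omega
      rw [r]
    · have k1 : ¬(pos - L ≥ 0 ∧ (cs.length : Int) - pos - L > 0) := by omega
      have k2 : ¬(pos - L ≥ 0 ∧ (cs.length : Int) - pos - L ≤ 0) := by omega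
      have k3 : ¬(pos - L < 0 ∧ (cs.length : Int) - pos - L > 0) := by omega
      have k4 : pos - L < 0 ∧ (cs.length : Int) - pos - L ≤ 0 := ⟨by omega, by omega⟩
      simp only [pvAStep, if_neg k1, if_neg k2, if_neg k3, if_pos k4, List.nil_append]
      rw [pvW_append cs _ 0 _ (by omega) (by omega), pvW_neg cs _ 0 le_rfl,
          pvW_append cs 0 (cs.length : Int) _ (by omega) (by omega),
          pvW_in cs 0 _ le_rfl (by omega) le_rfl, pvW_over cs _ _ le_rfl,
          PySem.List.slice_toNat cs le_rfl (by omega), PySem.List.slice_none_none]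
      have r1 : (0 - (pos - L)).toNat = (L - pos).toNat := by omega
      have r2 : (pos + L + 1 - (cs.length : Int)).toNat = (L + 1 - ((cs.length : Int) - pos)).toNat := by omega
      rw [r1, r2]
      simp

theorem pv_mem_enumerate_spec {α : Type} (cs : List α) (s : Int) (p : Int × α)
    (h : p ∈ PySem.List.enumerate cs s) :
    ∃ k : Nat, (k : Int) = p.1 - s ∧ cs[k]? = some p.2 := by
  induction cs generalizing s with
  | nil => simp [PySem.List.enumerate_nil] at h
  | cons c cs ih =>
    rw [PySem.List.enumerate_cons] at h
    rcases List.mem_cons.mp h with h' | h'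
    · exact ⟨0, by simp [h'], by simp [h']⟩
    · obtain ⟨k, hk1, hk2⟩ := ih (s + 1) h'
      exact ⟨k + 1, by push_cast; omega, by simpa using hk2⟩

theorem pv_L_neg_of (sw : Int) (h : PySem.Int.truncdiv (sw - 1) 2 < 0) : sw < 0 := by
  unfold PySem.Int.truncdiv at h
  by_contra hc
  rw [Int.not_lt] at hc
  rcases eq_or_lt_of_le hc with h0 | h1
  · rw [← h0] at h
    exact absurd h (by decide)
  · have : 0 ≤ (sw - 1).tdiv 2 := Int.tdiv_nonneg (by omega) (by omega)
    omega

-- A's loop body always appends (at most one branch fires)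
theorem pv_astep_append (cs : List Char) (L : Int) (fd : List String) (pos : Int) :
    pvAStep cs L fd pos = fd ++ pvAStep cs L [] pos := by
  simp only [pvAStep]
  split_ifs <;> simp

theorem pv_flatMap_filter {α β : Type} (q : α → Bool) (g : α → List β) (l : List α) :
    (l.filter q).flatMap g = l.flatMap (fun x => if q x then g x else []) := by
  induction l with
  | nil => rfl
  | cons x xs ih =>
    rw [List.filter_cons, List.flatMap_cons]
    by_cases h : q x = true
    · rw [if_pos h, List.flatMap_cons, if_pos h, ih]
    · rw [if_neg h, if_neg h, List.nil_append, ih]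

-- A's loop body as header + fragment (exactly one branch fires)
def pvAFrag (cs : List Char) (L pos : Int) : String :=
  let e : Int := cs.length
  if pos - L ≥ 0 ∧ e - pos - L > 0 then
    String.ofList (PySem.List.slice cs (some (pos - L)) (some (pos + L + 1)))
  else if pos - L ≥ 0 ∧ e - pos - L ≤ 0 then
    String.ofList (PySem.List.slice cs (some (pos - L)) none ++ List.replicate (L + 1 - (e - pos)).toNat 'O')
  else if pos - L < 0 ∧ e - pos - L > 0 then
    String.ofList (List.replicate (L - pos).toNat 'O' ++ PySem.List.slice cs none (some (pos + L + 1)))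
  else
    String.ofList (List.replicate (L - pos).toNat 'O' ++ PySem.List.slice cs none none ++ List.replicate (L + 1 - (e - pos)).toNat 'O')

theorem pv_astep_pair (cs : List Char) (L pos : Int) :
    pvAStep cs L [] pos = [pvHdr pos, pvAFrag cs L pos] := by
  simp only [pvAStep, pvAFrag]
  split_ifs <;> first | rfl | (exfalso; omega)

theorem pv_mem_enum {α : Type} (cs : List α) (s : Int) (k : Nat) (c : α)
    (h : cs[k]? = some c) : ((k : Int) + s, c) ∈ PySem.List.enumerate cs s := by
  induction cs generalizing s k with
  | nil => simp at h
  | cons x xs ih =>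
    rw [PySem.List.enumerate_cons]
    cases k with
    | zero =>
      simp at h
      simp [h]
    | succ k =>
      simp at h
      right
      have := ih (s + 1) k h
      have harith : ((k : Int)) + (s + 1) = ((k + 1 : Nat) : Int) + s := by push_cast; ring
      rw [harith] at this
      exact this

-- unconditional normal forms of both ports
theorem pv_get_frag_eq (s : String) (sw : Int) (name : String) :
    get_frag s sw name =
      ((PySem.List.enumerate s.toList 0).filter (fun p => p.2 == 'K')).flatMap
        (fun p => [pvHdr p.1, pvAFrag s.toList (PySem.Int.truncdiv (sw - 1) 2) p.1]) := by
  simp only [get_frag]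
  rw [show pvAStep s.toList (PySem.Int.truncdiv (sw - 1) 2) =
        (fun fd pos => fd ++ pvAStep s.toList (PySem.Int.truncdiv (sw - 1) 2) [] pos) from
      funext fun fd => funext fun pos => pv_astep_append _ _ fd pos,
    PySem.List.foldl_append_eq_flatMap, List.nil_append, List.flatMap_map]
  exact List.flatMap_congr fun p _ => pv_astep_pair _ _ _

theorem pv_get_frag_alt_eq (s : String) (sw : Int) (name : String) :
    get_frag_alt s sw name =
      ((PySem.List.enumerate s.toList 0).filter (fun p => p.2 == 'K')).flatMap
        (fun p => [pvHdr p.1,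
          String.ofList (pvW s.toList (p.1 - PySem.Int.truncdiv (sw - 1) 2)
            (p.1 + PySem.Int.truncdiv (sw - 1) 2 + 1))]) := by
  simp only [get_frag_alt]
  rw [show (fun (out : List String) (p : Int × Char) =>
        if p.2 == 'K' then
          out ++ [pvHdr p.1,
            String.ofList ((PySem.List.pyRange (p.1 - PySem.Int.truncdiv (sw - 1) 2)
                (p.1 + PySem.Int.truncdiv (sw - 1) 2 + 1)).map
              (fun j => if 0 ≤ j ∧ j < (s.toList.length : Int) then PySem.List.pyGetD s.toList j 'O' else 'O'))]
        else out) =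
      (fun out p => out ++ if p.2 == 'K' then
          [pvHdr p.1, String.ofList (pvW s.toList (p.1 - PySem.Int.truncdiv (sw - 1) 2)
            (p.1 + PySem.Int.truncdiv (sw - 1) 2 + 1))] else []) from by
        funext out p
        by_cases h : p.2 == 'K'
        · rw [if_pos h, if_pos h]; rfl
        · rw [if_neg h, if_neg h, List.append_nil],
    PySem.List.foldl_append_eq_flatMap, List.nil_append, ← pv_flatMap_filter]

-- equal flatMaps of header/fragment pairs force equal fragments
theorem pv_pairs_inj (P : List (Int × Char)) (fA fB : Int × Char → String)
    (h : P.flatMap (fun p => [pvHdr p.1, fA p]) = P.flatMap (fun p => [pvHdr p.1, fB p])) :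
    ∀ p ∈ P, fA p = fB p := by
  induction P with
  | nil => simp
  | cons x xs ih =>
    simp only [List.flatMap_cons, List.cons_append, List.nil_append, List.cons.injEq] at h
    intro p hp
    rcases List.mem_cons.mp hp with h' | h'
    · rw [h']; exact h.2.1
    · exact ih h.2.2 p h'

theorem pv_L_neg (sw : Int) (h : sw < 0) : PySem.Int.truncdiv (sw - 1) 2 < 0 := by
  unfold PySem.Int.truncdiv
  have hneg : sw - 1 = -(1 - sw) := by ring
  rw [hneg, Int.neg_tdiv]
  have : (1 - sw).tdiv 2 ≥ 1 := by
    rw [Int.tdiv_eq_ediv_of_nonneg (by omega)]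
    omega
  omega

-- ===== VERDICT =====
theorem get_frag_spec : Claim_unchanged_get_frag := by
  intro s sw name _ hnd
  set cs := s.toList with hcs
  set L := PySem.Int.truncdiv (sw - 1) 2 with hL
  -- condition needed per K position, derived from ¬ D_
  have hK : ∀ (pos : Int) (k : Nat), (k : Int) = pos → cs[k]? = some 'K' →
      ¬(L < 0 ∧ pos + L + 1 < 0 ∧ 0 < (cs.length : Int) + 2 * L + 1) := by
    rintro pos k hk hget ⟨hL0, hb, he⟩
    apply hnd
    refine ⟨pv_L_neg_of sw hL0, by omega, ?_⟩
    apply List.mem_of_getElem? (i := k)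
    rw [List.getElem?_take]
    rw [if_pos (by omega)]
    exact hget
  show get_frag s sw name = get_frag_alt s sw name
  rw [pv_get_frag_eq, pv_get_frag_alt_eq]
  apply List.flatMap_congr
  intro p hp
  have hpe := List.mem_filter.mp hp
  obtain ⟨k, hk1, hk2⟩ := pv_mem_enumerate_spec cs 0 p hpe.1
  have hlen : k < cs.length := (List.getElem?_eq_some_iff.mp hk2).1
  rw [of_decide_eq_true hpe.2] at hk2
  have hstep := pv_step_eq cs L p.1 (by omega) (by omega) (hK p.1 k (by omega) hk2)
  rw [pv_astep_pair] at hstep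
  simp only [List.cons.injEq] at hstep
  rw [hstep.2.1]

theorem get_frag_changed : Claim_changed_get_frag := by unfold Claim_changed_get_frag; decide

theorem get_frag_tight : Claim_exact_get_frag := by
  intro s sw name _ hD heq
  obtain ⟨hsw, he, hmem⟩ := hD
  set cs := s.toList with hcs
  set L := PySem.Int.truncdiv (sw - 1) 2 with hL
  have hL0 : L < 0 := pv_L_neg sw hsw
  obtain ⟨i, hi, hival⟩ := List.getElem_of_mem hmem
  have hi' : i < cs.length ∧ i < (-L - 1).toNat := by
    rw [List.length_take] at hi
    omega
  rw [List.getElem_take] at hival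
  have hgk : cs[i]? = some 'K' := by
    rw [List.getElem?_eq_getElem hi'.1, hival]
  have hmemE : ((i : Int), 'K') ∈ PySem.List.enumerate cs 0 := by
    have := pv_mem_enum cs 0 i 'K' hgk
    simpa using this
  have hmemF : ((i : Int), 'K') ∈ (PySem.List.enumerate cs 0).filter (fun p => p.2 == 'K') :=
    List.mem_filter.mpr ⟨hmemE, by simp⟩
  rw [pv_get_frag_eq, pv_get_frag_alt_eq] at heq
  have hfrag := pv_pairs_inj _ _ _ heq ((i : Int), 'K') hmemF
  have hBe : pvW cs ((i : Int) - L) ((i : Int) + L + 1) = [] := by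
    unfold pvW
    rw [PySem.List.pyRange_one_eq_nil (by omega)]
    simp
  have hilen : (i : Int) < (cs.length : Int) := by exact_mod_cast hi'.1
  have hiL : (i : Int) < -L - 1 := by omega
  have hc1 : (i : Int) - L ≥ 0 ∧ (cs.length : Int) - (i : Int) - L > 0 := ⟨by omega, by omega⟩
  rw [show pvAFrag cs L (i : Int) =
      String.ofList (PySem.List.slice cs (some ((i : Int) - L)) (some ((i : Int) + L + 1))) from by
    simp only [pvAFrag, if_pos hc1], hBe] at hfrag
  have hsl : PySem.List.slice cs (some ((i : Int) - L)) (some ((i : Int) + L + 1)) = [] := by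
    have := congrArg String.toList hfrag
    simpa using this
  have hlen0 := congrArg List.length hsl
  rw [PySem.List.length_slice] at hlen0
  unfold PySem.List.clampIdx at hlen0
  simp only [List.length_nil] at hlen0
  split_ifs at hlen0 <;> omega
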